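-- pv_equiv track=rewrite | github.com/datastart1/datastart-edgelab | save_20260412/edg_analysis_helpers.py | suggest_column
-- ===== SOURCE A (Python) =====
-- def suggest_column(columns: list[str], keywords: dict[str, int]) -> str | None:
--     best_col = None
--     best_score = -1
--
--     for col in columns:
--         name = col.strip().lower()
--         score = 0
--         for kw, points in keywords.items():
--             if kw in name:
--                 score += points
--
--         if score > best_score:
--             best_score = score
--             best_col = col
--
--     return best_col if best_score > 0 else None
-- ===== SOURCE B (Python) =====
-- def suggest_column(columns: list[str], keywords: dict[str, int]) -> str | None:
--     # Dictionary-matching by length buckets: instead of searching each name once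
--     # per keyword, scan each name's windows of the distinct keyword lengths and
--     # look them up in the dict, collecting the set of matched keywords.
--     lengths = sorted({len(kw) for kw in keywords})
--     scored = []
--     for col in columns:
--         name = col.strip().lower()
--         found = set()
--         for L in lengths:
--             for i in range(len(name) - L + 1):
--                 w = name[i:i + L]
--                 if w in keywords:
--                     found.add(w)
--         scored.append((col, sum(p for kw, p in keywords.items() if kw in found)))
--     if not scored:
--         return None
--     col, s = max(scored, key=lambda t: t[1])
--     return col if s > 0 else None
-- ===== Notes on version B (the rewrite author's own statement) =====
-- stated objective: alternative
-- what changed: Replaced A's per-keyword substring search of every column name with length-bucketed dictionary matching: B slides windows of each distinct keyword length over the name, looks each window up in the keyword dict to build the set of matched keywords, and then selects the first maximal-score column with max(key=...) instead of A's running-best loop.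
import Mathlib
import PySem

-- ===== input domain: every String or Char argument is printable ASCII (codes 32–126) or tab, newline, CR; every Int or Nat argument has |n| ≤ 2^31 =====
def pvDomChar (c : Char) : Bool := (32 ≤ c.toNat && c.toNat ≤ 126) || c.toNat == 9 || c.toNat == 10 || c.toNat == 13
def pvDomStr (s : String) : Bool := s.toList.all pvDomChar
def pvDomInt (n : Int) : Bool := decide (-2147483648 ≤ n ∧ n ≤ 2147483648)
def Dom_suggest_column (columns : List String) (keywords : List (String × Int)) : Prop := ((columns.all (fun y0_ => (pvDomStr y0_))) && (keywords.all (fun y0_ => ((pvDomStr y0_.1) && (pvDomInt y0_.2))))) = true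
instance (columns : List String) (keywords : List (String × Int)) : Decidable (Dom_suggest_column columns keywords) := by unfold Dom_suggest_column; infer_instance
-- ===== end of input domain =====

-- B replaces A's per-keyword substring search with length-bucketed dictionary matching (window scan + dict lookup building the set of matched keywords) and a max(key=..) selection; alternative algorithm, same result.


-- ===== PORT A =====
def suggest_column (columns : List String) (keywords : List (String × Int)) : Option String :=
  let r := columns.foldl (fun (st : Option String × Int) col =>
    let name := PySem.Str.lower (PySem.Str.strip col)
    let score := keywords.foldl (fun s kp => if PySem.Str.isIn kp.1 name then s + kp.2 else s) 0
    if score > st.2 then (some col, score) else st) (none, -1)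
  if r.2 > 0 then r.1 else none

-- ===== PORT B =====
def suggest_column_alt (columns : List String) (keywords : List (String × Int)) : Option String :=
  let lengths := PySem.List.sorted (PySem.Set.ofList (keywords.map (fun kp => PySem.Str.len kp.1))) (fun x => x) false
  let scored := columns.map (fun col =>
    let name := PySem.Str.lower (PySem.Str.strip col)
    let found := lengths.foldl (fun (f : PySem.Set String) L =>
        (PySem.List.pyRange 0 (PySem.Str.len name - L + 1)).foldl (fun (f : PySem.Set String) i =>
          let w := PySem.Str.slice name (some i) (some (i + L))
          if PySem.Dict.contains ⟨keywords⟩ w then PySem.Set.add f w else f) f)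
      PySem.Set.empty
    (col, keywords.foldl (fun s kp => if PySem.Set.contains found kp.1 then s + kp.2 else s) 0))
  match PySem.List.max? scored (fun t => t.2) with
  | none => none
  | some p => if p.2 > 0 then some p.1 else none

-- ===== PRECONDITION & SPEC =====
def Spec_suggest_column (columns : List String) (keywords : List (String × Int)) (out : Option String) : Prop := out = suggest_column_alt columns keywords
instance (columns : List String) (keywords : List (String × Int)) (out : Option String) : Decidable (Spec_suggest_column columns keywords out) := by unfold Spec_suggest_column; infer_instance

-- ===== CLAIM (what is proved, stated in full; the proofs are below) =====
def Claim_equal_suggest_column : Prop := ∀ (columns : List String) (keywords : List (String × Int)), Dom_suggest_column columns keywords → Spec_suggest_column columns keywords (suggest_column columns keywords)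

-- ===== LEMMAS AND PROOFS =====

-- membership in the inner window-scan fold (condition kept abstract as p)
theorem pv_mem_inner (g : Int → String) (p : String → Bool) (is : List Int) (f : PySem.Set String) (w : String) :
    (w ∈ is.foldl (fun (f : PySem.Set String) i => if p (g i) then PySem.Set.add f (g i) else f) f)
      ↔ w ∈ f ∨ ∃ i ∈ is, g i = w ∧ p w = true := by
  induction is generalizing f with
  | nil => simp
  | cons i t ih =>
    simp only [List.foldl_cons, List.mem_cons]
    by_cases hp : p (g i) = true
    · rw [if_pos hp, ih, PySem.Set.mem_add]
      constructor
      · rintro ((h | rfl) | ⟨j, hj, hg, hpw⟩)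
        · exact Or.inl h
        · exact Or.inr ⟨i, Or.inl rfl, rfl, hp⟩
        · exact Or.inr ⟨j, Or.inr hj, hg, hpw⟩
      · rintro (h | ⟨j, (rfl | hj), hg, hpw⟩)
        · exact Or.inl (Or.inl h)
        · exact Or.inl (Or.inr hg.symm)
        · exact Or.inr ⟨j, hj, hg, hpw⟩
    · rw [if_neg hp, ih]
      constructor
      · rintro (h | ⟨j, hj, hg, hpw⟩)
        · exact Or.inl h
        · exact Or.inr ⟨j, Or.inr hj, hg, hpw⟩
      · rintro (h | ⟨j, (rfl | hj), hg, hpw⟩)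
        · exact Or.inl h
        · rw [← hg] at hpw
          exact absurd hpw hp
        · exact Or.inr ⟨j, hj, hg, hpw⟩

-- membership in the outer fold over the distinct keyword lengths
theorem pv_mem_found (name : String) (kwp : String → Bool) (Ls : List Int) (f : PySem.Set String) (w : String) :
    (w ∈ Ls.foldl (fun (f : PySem.Set String) L =>
        (PySem.List.pyRange 0 (PySem.Str.len name - L + 1)).foldl (fun (f : PySem.Set String) i =>
          if kwp (PySem.Str.slice name (some i) (some (i + L))) then
            PySem.Set.add f (PySem.Str.slice name (some i) (some (i + L))) else f) f) f)
      ↔ w ∈ f ∨ ∃ L ∈ Ls, ∃ i ∈ PySem.List.pyRange 0 (PySem.Str.len name - L + 1),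
          PySem.Str.slice name (some i) (some (i + L)) = w ∧ kwp w = true := by
  induction Ls generalizing f with
  | nil => simp
  | cons L t ih =>
    simp only [List.foldl_cons, ih, pv_mem_inner (fun i => PySem.Str.slice name (some i) (some (i + L))) kwp]
    constructor
    · rintro ((h | ⟨i, hi, hg, hp⟩) | ⟨M, hM, hrest⟩)
      · exact Or.inl h
      · exact Or.inr ⟨L, by simp, i, hi, hg, hp⟩
      · exact Or.inr ⟨M, List.mem_cons_of_mem _ hM, hrest⟩
    · rintro (h | ⟨M, hM, hrest⟩)
      · exact Or.inl (Or.inl h)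
      · rcases List.mem_cons.mp hM with rfl | hM
        · exact Or.inl (Or.inr hrest)
        · exact Or.inr ⟨M, hM, hrest⟩

-- a window of the name of the right length equals kw iff kw occurs as a substring
theorem pv_window_iff_isIn (name kw : String) :
    (∃ i ∈ PySem.List.pyRange 0 (PySem.Str.len name - PySem.Str.len kw + 1),
        PySem.Str.slice name (some i) (some (i + PySem.Str.len kw)) = kw)
      ↔ PySem.Str.isIn kw name = true := by
  have hslice : ∀ i : Int, 0 ≤ i →
      (PySem.Str.slice name (some i) (some (i + PySem.Str.len kw))).toList
        = List.take kw.toList.length (List.drop i.toNat name.toList) := by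
    intro i hi
    rw [PySem.Str.toList_slice, PySem.Chars.slice_eq_listSlice,
      PySem.List.slice_toNat _ hi (by have := PySem.Str.len_eq kw; omega)]
    congr 1
    have := PySem.Str.len_eq kw
    omega
  rw [PySem.Str.isIn_iff_infix, ← PySem.Chars.isIn_iff_infix,
    ← PySem.Chars.exists_prefix_drop_iff_isIn]
  constructor
  · rintro ⟨i, hi, heq⟩
    rw [PySem.List.mem_pyRange_one] at hi
    refine ⟨i.toNat, ?_⟩
    rw [List.prefix_iff_eq_take, ← hslice i hi.1, heq]
  · rintro ⟨j, hj⟩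
    by_cases hjb : j ≤ name.toList.length
    · have hle : kw.toList.length ≤ name.toList.length - j := by
        have := hj.length_le
        simp only [List.length_drop] at this
        omega
      refine ⟨(j : Int), ?_, ?_⟩
      · rw [PySem.List.mem_pyRange_one]
        have h1 := PySem.Str.len_eq kw
        have h2 := PySem.Str.len_eq name
        omega
      · apply String.toList_inj.mp
        rw [hslice _ (by positivity)]
        simp only [Int.toNat_natCast]
        exact ((List.prefix_iff_eq_take.mp hj)).symm
    · -- j past the end forces kw = "", and window i = 0 works
      have hnil : List.drop j name.toList = [] := List.drop_eq_nil_of_le (by omega)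
      have hkw : kw.toList = [] := List.prefix_nil.mp (hnil ▸ hj)
      refine ⟨0, ?_, ?_⟩
      · rw [PySem.List.mem_pyRange_one]
        have h1 : PySem.Str.len kw = 0 := by rw [PySem.Str.len_eq kw, hkw]; simp
        have h2 := PySem.Str.len_eq name
        omega
      · apply String.toList_inj.mp
        rw [hslice 0 le_rfl, hkw]
        simp

-- any slice of the name is a contiguous piece of it
theorem pv_slice_infix (name : String) (a b : Int) :
    (PySem.Str.slice name (some a) (some b)).toList <:+: name.toList := by
  rw [PySem.Str.toList_slice, PySem.Chars.slice_eq_listSlice]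
  simp only [PySem.List.slice]
  exact ((List.take_prefix _ _).isInfix).trans ((List.drop_suffix _ _).isInfix)

-- every stored key satisfies the dict membership test
theorem pv_dict_contains (keywords : List (String × Int)) (kp : String × Int) (h : kp ∈ keywords) :
    PySem.Dict.contains ⟨keywords⟩ kp.1 = true := by
  simp only [PySem.Dict.contains, List.any_eq_true]
  exact ⟨kp, h, by simp⟩

-- a key's length is among the distinct sorted keyword lengths
theorem pv_len_mem (keywords : List (String × Int)) (kp : String × Int) (h : kp ∈ keywords) :
    PySem.Str.len kp.1 ∈ PySem.List.sorted (PySem.Set.ofList (keywords.map (fun kp => PySem.Str.len kp.1))) (fun x => x) false := by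
  rw [PySem.List.mem_sorted, PySem.Set.mem_ofList]
  exact List.mem_map.mpr ⟨kp, h, rfl⟩

-- for a keyword, membership in the found set is exactly substring occurrence
theorem pv_contains_found (keywords : List (String × Int)) (name : String) (kp : String × Int) (h : kp ∈ keywords) :
    PySem.Set.contains
      ((PySem.List.sorted (PySem.Set.ofList (keywords.map (fun kp => PySem.Str.len kp.1))) (fun x => x) false).foldl
        (fun (f : PySem.Set String) L =>
          (PySem.List.pyRange 0 (PySem.Str.len name - L + 1)).foldl (fun (f : PySem.Set String) i =>
            if PySem.Dict.contains ⟨keywords⟩ (PySem.Str.slice name (some i) (some (i + L))) then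
              PySem.Set.add f (PySem.Str.slice name (some i) (some (i + L))) else f) f)
        PySem.Set.empty)
      kp.1 = PySem.Str.isIn kp.1 name := by
  have hmem := pv_mem_found name (fun w => PySem.Dict.contains ⟨keywords⟩ w)
    (PySem.List.sorted (PySem.Set.ofList (keywords.map (fun kp => PySem.Str.len kp.1))) (fun x => x) false)
    PySem.Set.empty kp.1
  simp only [PySem.Set.contains]
  rcases hin : PySem.Str.isIn kp.1 name with _ | _
  · -- not a substring: no window can equal kp.1
    rw [Bool.eq_false_iff]
    intro hc
    rcases hmem.mp (List.contains_iff_mem.mp hc) with hf | ⟨L, _, i, _, heq, _⟩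
    · exact absurd hf (by simp [PySem.Set.empty])
    · have : PySem.Str.isIn kp.1 name = true := by
        rw [PySem.Str.isIn_iff_infix, ← heq]
        exact pv_slice_infix name i (i + L)
      rw [hin] at this
      exact absurd this (by simp)
  · -- a substring: the window at its occurrence puts kp.1 into found
    rw [List.contains_iff_mem]
    obtain ⟨i, hi, heq⟩ := (pv_window_iff_isIn name kp.1).mpr hin
    exact hmem.mpr (Or.inr ⟨PySem.Str.len kp.1, pv_len_mem keywords kp h, i, hi, heq,
      pv_dict_contains keywords kp h⟩)

-- selection invariant: A's running (best_col, best_score) vs max?'s accumulator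
def pvRel (bA : Option String × Int) (bB : Option (String × Int)) : Prop :=
  (bA = (none, -1) ∧ (bB = none ∨ ∃ c s, bB = some (c, s) ∧ s < 0)) ∨
  (∃ c s, 0 ≤ s ∧ bA = (some c, s) ∧ bB = some (c, s))

-- the accumulator step of PySem.List.max? on the score component
def pvMaxStep (acc : Option (String × Int)) (x : String × Int) : Option (String × Int) :=
  match acc with
  | none => some x
  | some m => if m.2 < x.2 then some x else some m

theorem pv_max?_eq (xs : List (String × Int)) :
    PySem.List.max? xs (fun t => t.2) = xs.foldl pvMaxStep none := by
  unfold PySem.List.max? pvMaxStep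
  apply PySem.List.foldl_congr_mem
  intro acc x _
  cases acc <;> rfl

theorem pv_sel_invariant (g : String → Int) :
    ∀ (cols : List String) (bA : Option String × Int) (bB : Option (String × Int)),
      pvRel bA bB →
      pvRel
        (cols.foldl (fun (st : Option String × Int) col =>
          if g col > st.2 then (some col, g col) else st) bA)
        ((cols.map (fun c => (c, g c))).foldl pvMaxStep bB) := by
  intro cols
  induction cols with
  | nil => intro bA bB h; simpa using h
  | cons c t ih =>
    intro bA bB h
    simp only [List.map_cons, List.foldl_cons]
    apply ih
    simp only [pvMaxStep]
    set x := g c with hx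
    rcases h with ⟨hA, hB⟩ | ⟨cc, s, hs, hA, hB⟩
    · rcases hB with hB | ⟨c', s', hB, hs'⟩
      · subst hA; subst hB
        by_cases hx0 : 0 ≤ x
        · right; exact ⟨c, x, hx0, by simp [show x > -1 by omega], rfl⟩
        · left
          exact ⟨by simp [show ¬ x > -1 by omega], Or.inr ⟨c, x, by simp, by omega⟩⟩
      · subst hA; subst hB
        by_cases hx0 : 0 ≤ x
        · right
          exact ⟨c, x, hx0, by simp [show x > -1 by omega], by simp [show s' < x by omega]⟩
        · left
          refine ⟨by simp [show ¬ x > -1 by omega], Or.inr ?_⟩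
          by_cases hxs : s' < x
          · exact ⟨c, x, by simp [hxs], by omega⟩
          · exact ⟨c', s', by simp [hxs], hs'⟩
    · subst hA; subst hB
      by_cases hxs : s < x
      · right; exact ⟨c, x, by omega, by simp [show x > s by omega], by simp [hxs]⟩
      · right; exact ⟨cc, s, hs, by simp [show ¬ x > s by omega], by simp [hxs]⟩

-- ===== VERDICT (by name: the statement is the Claim_ definition above) =====
set_option maxHeartbeats 1000000 in
theorem suggest_column_spec : Claim_equal_suggest_column := by
  intro columns keywords _
  unfold Spec_suggest_column suggest_column suggest_column_alt
  simp only
  -- B's scored list carries exactly A's per-column scores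
  have hscored :
      columns.map (fun col =>
        (col, keywords.foldl (fun s kp =>
          if PySem.Set.contains
              ((PySem.List.sorted (PySem.Set.ofList (keywords.map (fun kp => PySem.Str.len kp.1))) (fun x => x) false).foldl
                (fun (f : PySem.Set String) L =>
                  (PySem.List.pyRange 0 (PySem.Str.len (PySem.Str.lower (PySem.Str.strip col)) - L + 1)).foldl
                    (fun (f : PySem.Set String) i =>
                      if PySem.Dict.contains ⟨keywords⟩
                          (PySem.Str.slice (PySem.Str.lower (PySem.Str.strip col)) (some i) (some (i + L))) then
                        PySem.Set.add f (PySem.Str.slice (PySem.Str.lower (PySem.Str.strip col)) (some i) (some (i + L)))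
                      else f) f)
                PySem.Set.empty)
              kp.1
          then s + kp.2 else s) 0))
      = columns.map (fun col =>
          (col, keywords.foldl (fun s kp =>
            if PySem.Str.isIn kp.1 (PySem.Str.lower (PySem.Str.strip col)) then s + kp.2 else s) 0)) := by
    apply List.map_congr_left
    intro col _
    refine congrArg (fun z => (col, z)) ?_
    apply PySem.List.foldl_congr_mem
    intro acc kp hkp
    rw [pv_contains_found keywords (PySem.Str.lower (PySem.Str.strip col)) kp hkp]
  rw [hscored]
  have h := pv_sel_invariant
    (fun col => keywords.foldl (fun s kp =>
      if PySem.Str.isIn kp.1 (PySem.Str.lower (PySem.Str.strip col)) then s + kp.2 else s) 0)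
    columns (none, -1) none (Or.inl ⟨rfl, Or.inl rfl⟩)
  beta_reduce at h
  rw [pv_max?_eq]
  rcases h with ⟨hA, hB⟩ | ⟨c, s, hs, hA, hB⟩
  · rcases hB with hB | ⟨c', s', hB, hs'⟩
    · rw [hA, hB]; norm_num
    · rw [hA, hB]; simp [show ¬ s' > 0 by omega]
  · rw [hA, hB]
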